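-- pv_equiv track=rewrite | github.com/WorkedUpShoury/teller-made | backend/app/main.py | _join_until
-- ===== SOURCE A (Python) =====
-- from typing import Optional, List, Dict, Any, Tuple
--
-- def _join_until(chars_limit: int, items: List[str]) -> str:
--     out, cur = [], 0
--     for it in items:
--         add = (", " if out else "") + it
--         if cur + len(add) <= chars_limit:
--             out.append(it); cur += len(add)
--         else:
--             break
--     return ", ".join(out)
-- ===== SOURCE B (Python) =====
-- def _join_until(chars_limit, items):
--     # Build the prefix-cost table: cum[k] = total length of ", ".join(items[:k]).
--     cum, cur = [0], 0
--     for i, it in enumerate(items):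
--         cur += len(it) + (2 if i else 0)
--         cum.append(cur)
--     # Number of prefixes whose cost fits the budget (cum is nondecreasing).
--     n = sum(1 for c in cum if c <= chars_limit)
--     return ", ".join(items[:max(n - 1, 0)])
-- ===== Notes on version B (the rewrite author's own statement) =====
-- stated objective: alternative
-- what changed: Replaces A's accumulate-and-break loop that appends taken items with a prefix-cost table (cum[k] = cost of joining the first k items), a count of table entries within the budget, and a single slice-and-join.
import Mathlib
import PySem

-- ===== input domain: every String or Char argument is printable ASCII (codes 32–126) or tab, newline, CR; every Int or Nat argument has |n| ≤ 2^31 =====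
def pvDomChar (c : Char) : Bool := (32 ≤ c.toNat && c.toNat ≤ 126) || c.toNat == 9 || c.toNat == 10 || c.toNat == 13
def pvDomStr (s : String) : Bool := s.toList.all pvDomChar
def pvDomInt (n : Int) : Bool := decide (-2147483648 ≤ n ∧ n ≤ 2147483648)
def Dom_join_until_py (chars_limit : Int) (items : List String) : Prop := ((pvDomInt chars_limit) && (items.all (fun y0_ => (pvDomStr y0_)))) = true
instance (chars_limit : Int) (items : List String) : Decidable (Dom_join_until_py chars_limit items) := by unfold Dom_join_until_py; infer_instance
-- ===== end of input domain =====

-- B replaces A's accumulate-and-break loop by a prefix-cost table, a count of fitting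
-- prefixes and a single slice-and-join (objective: alternative decomposition, same cost).

-- ===== PORT A =====
-- the for-loop of A: state (out, cur), early 'break' returns out
def joinA_go (chars_limit : Int) (out : List String) (cur : Int) (rest : List String) : List String :=
  match rest with
  | [] => out
  | it :: r =>
    let add := (if !out.isEmpty then ", " else "") ++ it
    if cur + PySem.Str.len add ≤ chars_limit then
      joinA_go chars_limit (out ++ [it]) (cur + PySem.Str.len add) r
    else out

def join_until_py (chars_limit : Int) (items : List String) : String :=
  PySem.Str.join ", " (joinA_go chars_limit [] 0 items)

-- ===== PORT B =====
-- the table-building loop of B: cum entries after index 0, running cur, index i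
def cumGo (cur : Int) (i : Nat) (rest : List String) : List Int :=
  match rest with
  | [] => []
  | it :: r =>
    let cur' := cur + PySem.Str.len it + (if i ≠ 0 then 2 else 0)
    cur' :: cumGo cur' (i + 1) r

def join_until_py_alt (chars_limit : Int) (items : List String) : String :=
  let cum : List Int := 0 :: cumGo 0 0 items
  let n : Int := (cum.countP (fun c => decide (c ≤ chars_limit)) : Nat)
  PySem.Str.join ", " (items.take (max (n - 1) 0).toNat)

-- ===== PRECONDITION & SPEC =====
def Spec_join_until_py (chars_limit : Int) (items : List String) (out : String) : Prop := out = join_until_py_alt chars_limit items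
instance (chars_limit : Int) (items : List String) (out : String) : Decidable (Spec_join_until_py chars_limit items out) := by unfold Spec_join_until_py; infer_instance

-- ===== CLAIM (what is proved, stated in full; the proofs are below) =====
def Claim_equal_join_until_py : Prop := ∀ (chars_limit : Int) (items : List String), Dom_join_until_py chars_limit items → Spec_join_until_py chars_limit items (join_until_py chars_limit items)

-- ===== LEMMAS AND PROOFS =====

-- the greedy tail phase (a comma is always prepended): abstract description shared by both proofs
def greedyA (chars_limit cur : Int) : List String → List String
  | [] => []
  | it :: r =>
    if cur + (2 + PySem.Str.len it) ≤ chars_limit then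
      it :: greedyA chars_limit (cur + (2 + PySem.Str.len it)) r
    else []

theorem len_comma_append (it : String) :
    PySem.Str.len (", " ++ it) = 2 + PySem.Str.len it := by
  simp
  omega

theorem len_nonneg (s : String) : 0 ≤ PySem.Str.len s := by
  simp [PySem.Str.len_eq]

theorem joinA_go_nonempty (L : Int) :
    ∀ (rest : List String) (out : List String) (cur : Int), out ≠ [] →
      joinA_go L out cur rest = out ++ greedyA L cur rest := by
  intro rest
  induction rest with
  | nil => intro out cur _; simp [joinA_go, greedyA]
  | cons it r ih =>
    intro out cur hne
    have hie : out.isEmpty = false := by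
      cases out with
      | nil => exact absurd rfl hne
      | cons _ _ => rfl
    simp only [joinA_go, greedyA, hie, Bool.not_false, reduceIte, len_comma_append]
    by_cases h : cur + (2 + PySem.Str.len it) ≤ L
    · rw [if_pos h, if_pos h, ih (out ++ [it]) (cur + (2 + PySem.Str.len it)) (by simp)]
      simp
    · rw [if_neg h, if_neg h, List.append_nil]

theorem cumGo_mono (cur : Int) (i : Nat) (rest : List String) :
    ∀ c ∈ cumGo cur i rest, cur ≤ c := by
  induction rest generalizing cur i with
  | nil => simp [cumGo]
  | cons it r ih =>
    intro c hc
    have hlen := len_nonneg it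
    have hstep : cur ≤ cur + PySem.Str.len it + (if i ≠ 0 then 2 else 0) := by
      split <;> omega
    simp only [cumGo, List.mem_cons] at hc
    rcases hc with h | h
    · omega
    · have := ih (cur + PySem.Str.len it + (if i ≠ 0 then 2 else 0)) (i + 1) c h
      omega

theorem countP_cumGo (L : Int) :
    ∀ (rest : List String) (cur : Int) (i : Nat), i ≠ 0 →
      (cumGo cur i rest).countP (fun c => decide (c ≤ L)) = (greedyA L cur rest).length := by
  intro rest
  induction rest with
  | nil => intro cur i _; simp [cumGo, greedyA]
  | cons it r ih =>
    intro cur i hi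
    simp only [cumGo, greedyA, if_pos hi, List.countP_cons]
    by_cases h : cur + PySem.Str.len it + 2 ≤ L
    · have h' : cur + (2 + PySem.Str.len it) ≤ L := by omega
      rw [if_pos h']
      simp only [List.length_cons, decide_eq_true_eq, if_pos h]
      rw [ih (cur + PySem.Str.len it + 2) (i + 1) (by omega)]
      have : cur + PySem.Str.len it + 2 = cur + (2 + PySem.Str.len it) := by omega
      rw [this]
    · have h' : ¬ cur + (2 + PySem.Str.len it) ≤ L := by omega
      rw [if_neg h']
      have hz : (cumGo (cur + PySem.Str.len it + 2) (i + 1) r).countP (fun c => decide (c ≤ L)) = 0 := by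
        apply List.countP_eq_zero.mpr
        intro c hc
        have := cumGo_mono (cur + PySem.Str.len it + 2) (i + 1) r c hc
        simp only [decide_eq_true_eq]
        omega
      simp only [decide_eq_true_eq, if_neg h, hz, List.length_nil]

theorem greedyA_prefix (L : Int) :
    ∀ (rest : List String) (cur : Int),
      greedyA L cur rest = rest.take (greedyA L cur rest).length := by
  intro rest
  induction rest with
  | nil => intro cur; simp [greedyA]
  | cons it r ih =>
    intro cur
    by_cases h : cur + (2 + PySem.Str.len it) ≤ L
    · simp only [greedyA, if_pos h, List.length_cons, List.take_succ_cons]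
      exact congrArg (it :: ·) (ih _)
    · simp only [greedyA, if_neg h, List.length_nil, List.take_zero]

theorem lists_eq (L : Int) (items : List String) :
    joinA_go L [] 0 items =
      items.take (max ((((0 :: cumGo 0 0 items).countP (fun c => decide (c ≤ L)) : Nat) : Int) - 1) 0).toNat := by
  cases items with
  | nil =>
    simp only [joinA_go, cumGo, List.countP_cons, List.countP_nil]
    by_cases h : (0 : Int) ≤ L <;> simp [h]
  | cons it r =>
    have hlen := len_nonneg it
    have hfirst : cumGo 0 0 (it :: r) =
        (0 + PySem.Str.len it + 0) :: cumGo (0 + PySem.Str.len it + 0) 1 r := by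
      simp [cumGo]
    rw [hfirst]
    have hA : joinA_go L [] 0 (it :: r) =
        if 0 + PySem.Str.len it ≤ L then [it] ++ greedyA L (0 + PySem.Str.len it) r else [] := by
      simp only [joinA_go, List.isEmpty_nil, Bool.not_true, Bool.false_eq_true, if_false,
        List.nil_append, String.empty_append]
      by_cases h : 0 + PySem.Str.len it ≤ L
      · rw [if_pos h, if_pos h, joinA_go_nonempty L r [it] _ (by simp)]
      · rw [if_neg h, if_neg h]
    rw [hA]
    simp only [List.countP_cons, decide_eq_true_eq]
    by_cases hL : (0 : Int) ≤ L
    · by_cases hfit : 0 + PySem.Str.len it ≤ L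
      · rw [if_pos hfit]
        have hfit' : 0 + PySem.Str.len it + 0 ≤ L := by omega
        rw [if_pos hL, if_pos hfit']
        rw [countP_cumGo L r (0 + PySem.Str.len it + 0) 1 (by omega)]
        have harith : 0 + PySem.Str.len it + 0 = 0 + PySem.Str.len it := by omega
        rw [harith]
        set g := greedyA L (0 + PySem.Str.len it) r with hg
        have : (max ((((g.length + 1 + 1 : Nat)) : Int) - 1) 0).toNat = g.length + 1 := by
          omega
        rw [this, List.take_succ_cons]
        exact congrArg (it :: ·) (greedyA_prefix L r _)
      · rw [if_neg hfit]
        have hfit' : ¬ 0 + PySem.Str.len it + 0 ≤ L := by omega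
        rw [if_pos hL, if_neg hfit']
        have hz : (cumGo (0 + PySem.Str.len it + 0) 1 r).countP (fun c => decide (c ≤ L)) = 0 := by
          apply List.countP_eq_zero.mpr
          intro c hc
          have := cumGo_mono (0 + PySem.Str.len it + 0) 1 r c hc
          simp only [decide_eq_true_eq]
          omega
        rw [hz]
        simp
    · have hfit : ¬ 0 + PySem.Str.len it ≤ L := by omega
      rw [if_neg hfit, if_neg hL, if_neg (by omega : ¬ 0 + PySem.Str.len it + 0 ≤ L)]
      have hz : (cumGo (0 + PySem.Str.len it + 0) 1 r).countP (fun c => decide (c ≤ L)) = 0 := by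
        apply List.countP_eq_zero.mpr
        intro c hc
        have := cumGo_mono (0 + PySem.Str.len it + 0) 1 r c hc
        simp only [decide_eq_true_eq]
        omega
      rw [hz]
      simp

-- ===== VERDICT (by name: the statement is the Claim_ definition above) =====
theorem join_until_py_spec : Claim_equal_join_until_py := by
  intro L items _
  unfold Spec_join_until_py join_until_py join_until_py_alt
  exact congrArg (PySem.Str.join ", ") (lists_eq L items)
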